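-- pv_equiv track=rewrite | github.com/DauDinhQuangAnh/API_RAG | API_RAG_NEW/rag_pipeline.py | format_retrieved_data
-- ===== SOURCE A (Python) =====
-- from typing import Any, Sequence
--
-- def format_retrieved_data(
--     metadatas: list[dict[str, Any]], columns_to_answer: Sequence[str]
-- ) -> str:
--     lines: list[str] = []
--     normalized_columns = [
--         (str(column), str(column).casefold()) for column in columns_to_answer
--     ]
--     available_columns: set[str] = set()
--     normalized_metadatas: list[dict[str, Any]] = []
--
--     for metadata in metadatas:
--         normalized_metadata = {}
--         if isinstance(metadata, dict):
--             normalized_metadata = {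
--                 str(key).casefold(): value for key, value in metadata.items()
--             }
--             available_columns.update(normalized_metadata.keys())
--         normalized_metadatas.append(normalized_metadata)
--
--     missing_columns = [
--         column
--         for column, normalized_column in normalized_columns
--         if normalized_column not in available_columns
--     ]
--     if missing_columns:
--         missing_list = ", ".join(missing_columns)
--         raise ValueError(
--             f"Requested columns not found in collection metadata: {missing_list}"
--         )
--
--     for index, normalized_metadata in enumerate(normalized_metadatas, start=1):
--         columns = [
--             f"{column}: {normalized_metadata.get(normalized_column)}"
--             for column, normalized_column in normalized_columns
--             if normalized_column in normalized_metadata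
--         ]
--         line = f"{index}) {' '.join(columns)}".rstrip()
--         lines.append(line)
--
--     return "\n".join(lines)
-- ===== SOURCE B (Python) =====
-- def format_retrieved_data(metadatas, columns_to_answer):
--     cols = [(str(c), str(c).casefold()) for c in columns_to_answer]
--     lines = []
--     seen = set()
--     for i, metadata in enumerate(metadatas, start=1):
--         row = {}
--         if isinstance(metadata, dict):
--             for key, value in metadata.items():
--                 row[str(key).casefold()] = value
--             seen.update(row)
--         parts = " ".join(
--             f"{column}: {row.get(normalized)}" for column, normalized in cols if normalized in row
--         )
--         lines.append(f"{i}) {parts}".rstrip())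
--     missing = [column for column, normalized in cols if normalized not in seen]
--     if missing:
--         raise ValueError(
--             "Requested columns not found in collection metadata: " + ", ".join(missing)
--         )
--     return "\n".join(lines)
-- ===== Notes on version B (the rewrite author's own statement) =====
-- stated objective: simpler
-- what changed: A's three passes (normalize rows while collecting available keys into a list+set, then the missing-column check, then a second formatting loop over the stored normalized dicts) are fused into a single loop over enumerate(metadatas) that normalizes, formats the line and updates the seen-key set at once, with the missing check done afterwards; no intermediate list of normalized dicts is kept.
import Mathlib
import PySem

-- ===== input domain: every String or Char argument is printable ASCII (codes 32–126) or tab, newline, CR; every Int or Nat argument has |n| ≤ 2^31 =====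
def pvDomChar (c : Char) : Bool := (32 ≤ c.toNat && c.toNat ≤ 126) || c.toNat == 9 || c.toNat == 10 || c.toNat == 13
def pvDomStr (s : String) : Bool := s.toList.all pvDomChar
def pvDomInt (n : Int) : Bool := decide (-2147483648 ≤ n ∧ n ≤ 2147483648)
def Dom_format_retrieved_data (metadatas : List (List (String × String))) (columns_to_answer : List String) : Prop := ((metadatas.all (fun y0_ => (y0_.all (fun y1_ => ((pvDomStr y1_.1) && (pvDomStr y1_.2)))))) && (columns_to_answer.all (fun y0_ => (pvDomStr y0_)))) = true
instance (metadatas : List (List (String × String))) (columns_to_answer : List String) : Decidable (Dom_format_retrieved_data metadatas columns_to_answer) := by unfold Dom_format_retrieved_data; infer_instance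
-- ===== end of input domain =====

-- B fuses A's three passes (normalize+collect, missing check, format) into one loop that
-- formats each row as it normalizes it (objective: simpler decomposition, same cost).
-- Return-value equivalence only; where Python A raises ValueError (outside Pre_) both ports return "".

-- ===== PORT A =====
-- A, step for step: pass 1 builds the list of casefolded dicts and the union of their keys,
-- then the missing check, then pass 2 formats each normalized dict.  'raise ValueError' ↦ "".
def format_retrieved_data (metadatas : List (List (String × String))) (columns_to_answer : List String) : String :=
  let normalized_columns : List (String × String) :=
    columns_to_answer.map (fun column => (column, PySem.Str.lower column))
  -- first loop: (available_columns, normalized_metadatas); every row is a dict so the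
  -- isinstance branch is always taken
  let st :=
    metadatas.foldl
      (fun (st : PySem.Set String × List (PySem.Dict String String)) metadata =>
        let normalized_metadata : PySem.Dict String String :=
          metadata.foldl (fun d kv => d.insert (PySem.Str.lower kv.1) kv.2) PySem.Dict.empty
        (PySem.Set.update st.1 normalized_metadata.keys, st.2 ++ [normalized_metadata]))
      (PySem.Set.empty, [])
  let missing_columns :=
    (normalized_columns.filter (fun p => !(PySem.Set.contains st.1 p.2))).map (fun p => p.1)
  if missing_columns ≠ [] then ""  -- Python raises ValueError here (excluded by Pre_)
  else
    -- second loop over enumerate(normalized_metadatas, start=1)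
    let lines :=
      (PySem.List.enumerate st.2 1).map (fun p =>
        let columns :=
          (normalized_columns.filter (fun q => (p.2).contains q.2)).map
            (fun q => q.1 ++ ": " ++ (p.2).getD q.2 "")  -- getD: key present (guarded by filter)
        PySem.Str.rstrip (PySem.Int.toStr p.1 ++ ") " ++ PySem.Str.join " " columns))
    PySem.Str.join "\n" lines

-- ===== PORT B =====
-- B, step for step: ONE loop over enumerate(metadatas, 1) carrying (lines, seen); the
-- missing check is done after the loop.  'raise ValueError' ↦ "".
def format_retrieved_data_alt (metadatas : List (List (String × String))) (columns_to_answer : List String) : String :=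
  let cols : List (String × String) :=
    columns_to_answer.map (fun c => (c, PySem.Str.lower c))
  let st :=
    (PySem.List.enumerate metadatas 1).foldl
      (fun (st : List String × PySem.Set String) p =>
        let row : PySem.Dict String String :=
          p.2.foldl (fun d kv => d.insert (PySem.Str.lower kv.1) kv.2) PySem.Dict.empty
        let parts :=
          PySem.Str.join " "
            ((cols.filter (fun q => row.contains q.2)).map
              (fun q => q.1 ++ ": " ++ row.getD q.2 ""))  -- getD: key present (guarded by filter)
        (st.1 ++ [PySem.Str.rstrip (PySem.Int.toStr p.1 ++ ") " ++ parts)],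
         PySem.Set.update st.2 row.keys))
      ([], PySem.Set.empty)
  let missing := (cols.filter (fun q => !(PySem.Set.contains st.2 q.2))).map (fun q => q.1)
  if missing ≠ [] then ""  -- Python raises ValueError here (excluded by Pre_)
  else PySem.Str.join "\n" st.1

-- ===== PRECONDITION & SPEC =====
-- Pre_ excludes exactly the inputs on which A raises ValueError: some requested column's
-- casefold occurs as no key (casefolded) of any metadata row.
def Pre_format_retrieved_data (metadatas : List (List (String × String))) (columns_to_answer : List String) : Prop :=
  ∀ c ∈ columns_to_answer, ∃ m ∈ metadatas, ∃ kv ∈ m, PySem.Str.lower kv.1 = PySem.Str.lower c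
instance (metadatas : List (List (String × String))) (columns_to_answer : List String) : Decidable (Pre_format_retrieved_data metadatas columns_to_answer) := by unfold Pre_format_retrieved_data; infer_instance

def pvWitness_format_retrieved_data : (List (List (String × String))) × List String :=
  ([[("Name", "Ada"), ("Age", "36")], [("name", "Bob")]], ["name", "AGE"])

def Spec_format_retrieved_data (metadatas : List (List (String × String))) (columns_to_answer : List String) (out : String) : Prop := out = format_retrieved_data_alt metadatas columns_to_answer
instance (metadatas : List (List (String × String))) (columns_to_answer : List String) (out : String) : Decidable (Spec_format_retrieved_data metadatas columns_to_answer out) := by unfold Spec_format_retrieved_data; infer_instance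

-- ===== CLAIM (what is proved, stated in full; the proofs are below) =====
def Claim_equal_format_retrieved_data : Prop := ∀ (metadatas : List (List (String × String))) (columns_to_answer : List String), Dom_format_retrieved_data metadatas columns_to_answer → Pre_format_retrieved_data metadatas columns_to_answer → Spec_format_retrieved_data metadatas columns_to_answer (format_retrieved_data metadatas columns_to_answer)

-- ===== LEMMAS AND PROOFS =====

theorem pv_enumerate_map {α β : Type} (f : α → β) :
    ∀ (xs : List α) (i : Int),
      PySem.List.enumerate (xs.map f) i
        = (PySem.List.enumerate xs i).map (fun p => (p.1, f p.2)) := by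
  intro xs
  induction xs with
  | nil => simp [PySem.List.enumerate_nil]
  | cons x xs ih => intro i; simp [PySem.List.enumerate_cons, ih]

-- The two generic lemmas, specialised to the ports' concrete loop bodies (so that rw matches).
theorem pv_foldA' (xs : List (List (String × String))) (c : PySem.Set String)
    (acc : List (PySem.Dict String String)) :
    List.foldl (fun st metadata =>
        (PySem.Set.update st.1
            (List.foldl (fun d kv => d.insert (PySem.Str.lower kv.1) kv.2) PySem.Dict.empty metadata).keys,
         st.2 ++ [List.foldl (fun d kv => d.insert (PySem.Str.lower kv.1) kv.2) PySem.Dict.empty metadata]))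
      (c, acc) xs
    = (List.foldl (fun s metadata => PySem.Set.update s
          (List.foldl (fun d kv => d.insert (PySem.Str.lower kv.1) kv.2) PySem.Dict.empty metadata).keys) c xs,
       acc ++ xs.map (fun metadata =>
          List.foldl (fun d kv => d.insert (PySem.Str.lower kv.1) kv.2) PySem.Dict.empty metadata)) :=
by
  induction xs generalizing c acc with
  | nil => simp
  | cons x xs ih => simp [ih]

theorem pv_foldB' (cols : List (String × String)) (xs : List (List (String × String)))
    (i : Int) (L : List String) (s : PySem.Set String) :
    List.foldl (fun (st : List String × PySem.Set String) p =>
        (st.1 ++ [PySem.Str.rstrip (PySem.Int.toStr p.1 ++ ") " ++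
            PySem.Str.join " "
              ((cols.filter (fun q =>
                  (List.foldl (fun d kv => d.insert (PySem.Str.lower kv.1) kv.2) PySem.Dict.empty p.2).contains q.2)).map
                (fun q => q.1 ++ ": " ++
                  (List.foldl (fun d kv => d.insert (PySem.Str.lower kv.1) kv.2) PySem.Dict.empty p.2).getD q.2 "")))],
         PySem.Set.update st.2
           (List.foldl (fun d kv => d.insert (PySem.Str.lower kv.1) kv.2) PySem.Dict.empty p.2).keys))
      (L, s) (PySem.List.enumerate xs i)
    = (L ++ (PySem.List.enumerate xs i).map (fun p =>
          PySem.Str.rstrip (PySem.Int.toStr p.1 ++ ") " ++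
            PySem.Str.join " "
              ((cols.filter (fun q =>
                  (List.foldl (fun d kv => d.insert (PySem.Str.lower kv.1) kv.2) PySem.Dict.empty p.2).contains q.2)).map
                (fun q => q.1 ++ ": " ++
                  (List.foldl (fun d kv => d.insert (PySem.Str.lower kv.1) kv.2) PySem.Dict.empty p.2).getD q.2 "")))),
       List.foldl (fun s m => PySem.Set.update s
          (List.foldl (fun d kv => d.insert (PySem.Str.lower kv.1) kv.2) PySem.Dict.empty m).keys) s xs) :=
by
  induction xs generalizing i L s with
  | nil => simp [PySem.List.enumerate_nil]
  | cons x xs ih => simp [PySem.List.enumerate_cons, ih]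

-- ===== VERDICT (by name: the statement is the Claim_ definition above) =====
theorem format_retrieved_data_spec : Claim_equal_format_retrieved_data := by
  intro metadatas columns_to_answer _ _
  unfold Spec_format_retrieved_data format_retrieved_data format_retrieved_data_alt
  simp only []
  rw [pv_foldA', pv_foldB']
  simp [pv_enumerate_map, Function.comp_def]
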